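-- pv_equiv track=rewrite | github.com/hoangchitrung/bmttnc-hutech-2280603437 | final_project/algorithms/aes.py | mix_single_column
-- ===== SOURCE A (Python) =====
-- def mix_single_column(col):
--     """Trộn 1 cột theo chuẩn AES (4 phần tử)"""
--
--     # Chuẩn hóa phép nhân ma trận MixColumns AES
--     def mul(a, b):
--         p = 0
--         for i in range(8):
--             if b & 1:
--                 p ^= a
--             hi_bit_set = a & 0x80
--             a = (a << 1) & 0xFF
--             if hi_bit_set:
--                 a ^= 0x1B
--             b >>= 1
--         return p
--
--     c0 = mul(col[0], 2) ^ mul(col[1], 3) ^ col[2] ^ col[3]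
--     c1 = col[0] ^ mul(col[1], 2) ^ mul(col[2], 3) ^ col[3]
--     c2 = col[0] ^ col[1] ^ mul(col[2], 2) ^ mul(col[3], 3)
--     c3 = mul(col[0], 3) ^ col[1] ^ col[2] ^ mul(col[3], 2)
--     return [c0, c1, c2, c3]
-- ===== SOURCE B (Python) =====
-- def mix_single_column(col):
--     """Trộn 1 cột theo chuẩn AES (4 phần tử)"""
--
--     def xtime(a):
--         d = (a << 1) & 0xFF
--         return d ^ 0x1B if a & 0x80 else d
--
--     a0, a1, a2, a3 = col[0], col[1], col[2], col[3]
--     return [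
--         xtime(a0) ^ (a1 ^ xtime(a1)) ^ a2 ^ a3,
--         a0 ^ xtime(a1) ^ (a2 ^ xtime(a2)) ^ a3,
--         a0 ^ a1 ^ xtime(a2) ^ (a3 ^ xtime(a3)),
--         (a0 ^ xtime(a0)) ^ a1 ^ a2 ^ xtime(a3),
--     ]
-- ===== Notes on version B (the rewrite author's own statement) =====
-- stated objective: simpler
-- what changed: Replaced the 8-iteration GF(2^8) multiply loop by a single closed-form xtime helper (mul(a,2)=xtime(a), mul(a,3)=a^xtime(a)), computing each output byte with straight-line code and no loop.
import Mathlib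
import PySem

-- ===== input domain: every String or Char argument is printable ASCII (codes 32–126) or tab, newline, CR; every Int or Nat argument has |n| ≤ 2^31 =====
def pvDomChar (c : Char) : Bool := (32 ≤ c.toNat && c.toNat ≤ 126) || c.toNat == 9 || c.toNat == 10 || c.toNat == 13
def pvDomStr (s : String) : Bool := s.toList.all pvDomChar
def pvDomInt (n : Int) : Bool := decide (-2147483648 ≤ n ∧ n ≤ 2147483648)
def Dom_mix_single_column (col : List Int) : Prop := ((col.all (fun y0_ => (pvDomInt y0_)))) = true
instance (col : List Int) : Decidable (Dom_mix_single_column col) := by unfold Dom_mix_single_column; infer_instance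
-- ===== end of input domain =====

-- B replaces A's 8-iteration GF(2^8) multiply loop with a closed-form xtime helper (simpler, loop-free).


-- ===== PORT A =====
-- A's inner 'mul': loop over range(8) with state (p, a, b)
def pvMulStep (st : Int × Int × Int) (_ : Int) : Int × Int × Int :=
  let (p, a, b) := st
  let p := if PySem.Int.band b 1 ≠ 0 then PySem.Int.bxor p a else p
  let hi_bit_set := PySem.Int.band a 0x80
  let a := PySem.Int.band (a <<< 1) 0xFF
  let a := if hi_bit_set ≠ 0 then PySem.Int.bxor a 0x1B else a
  let b := b >>> 1
  (p, a, b)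

def pvMul (a b : Int) : Int :=
  ((PySem.List.pyRange 0 8 1).foldl pvMulStep (0, a, b)).1

def mix_single_column (col : List Int) : List Int :=
  let g := fun i => PySem.List.pyGetD col i 0   -- col[i]; Pre_ guarantees these indices exist
  let c0 := PySem.Int.bxor (PySem.Int.bxor (PySem.Int.bxor (pvMul (g 0) 2) (pvMul (g 1) 3)) (g 2)) (g 3)
  let c1 := PySem.Int.bxor (PySem.Int.bxor (PySem.Int.bxor (g 0) (pvMul (g 1) 2)) (pvMul (g 2) 3)) (g 3)
  let c2 := PySem.Int.bxor (PySem.Int.bxor (PySem.Int.bxor (g 0) (g 1)) (pvMul (g 2) 2)) (pvMul (g 3) 3)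
  let c3 := PySem.Int.bxor (PySem.Int.bxor (PySem.Int.bxor (pvMul (g 0) 3) (g 1)) (g 2)) (pvMul (g 3) 2)
  [c0, c1, c2, c3]

-- ===== PORT B =====
def pvXtime (a : Int) : Int :=
  let d := PySem.Int.band (a <<< 1) 0xFF
  if PySem.Int.band a 0x80 ≠ 0 then PySem.Int.bxor d 0x1B else d

def mix_single_column_alt (col : List Int) : List Int :=
  let a0 := PySem.List.pyGetD col 0 0
  let a1 := PySem.List.pyGetD col 1 0
  let a2 := PySem.List.pyGetD col 2 0
  let a3 := PySem.List.pyGetD col 3 0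
  [ PySem.Int.bxor (PySem.Int.bxor (PySem.Int.bxor (pvXtime a0) (PySem.Int.bxor a1 (pvXtime a1))) a2) a3,
    PySem.Int.bxor (PySem.Int.bxor (PySem.Int.bxor a0 (pvXtime a1)) (PySem.Int.bxor a2 (pvXtime a2))) a3,
    PySem.Int.bxor (PySem.Int.bxor (PySem.Int.bxor a0 a1) (pvXtime a2)) (PySem.Int.bxor a3 (pvXtime a3)),
    PySem.Int.bxor (PySem.Int.bxor (PySem.Int.bxor (PySem.Int.bxor a0 (pvXtime a0)) a1) a2) (pvXtime a3) ]

-- ===== PRECONDITION & SPEC =====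
-- Pre_: A reads col[0..3] and raises IndexError on lists shorter than 4.
def Pre_mix_single_column (col : List Int) : Prop := 4 ≤ col.length
instance (col : List Int) : Decidable (Pre_mix_single_column col) := by unfold Pre_mix_single_column; infer_instance
def pvWitness_mix_single_column : List Int := [0x63, 0x2F, 0xAF, 0xA2]
def Spec_mix_single_column (col : List Int) (out : List Int) : Prop := out = mix_single_column_alt col
instance (col : List Int) (out : List Int) : Decidable (Spec_mix_single_column col out) := by unfold Spec_mix_single_column; infer_instance

-- ===== CLAIM (what is proved, stated in full; the proofs are below) =====
def Claim_equal_mix_single_column : Prop := ∀ (col : List Int), Dom_mix_single_column col → Pre_mix_single_column col → Spec_mix_single_column col (mix_single_column col)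

-- ===== LEMMAS AND PROOFS =====
-- once b has become 0, no later iteration changes p
theorem pvMulStep_b_zero (l : List Int) (p a : Int) :
    (l.foldl pvMulStep (p, a, 0)).1 = p := by
  induction l generalizing a with
  | nil => rfl
  | cons x xs ih =>
    simp only [List.foldl_cons]
    have h : pvMulStep (p, a, 0) x =
        (p, if PySem.Int.band a 0x80 ≠ 0 then
              PySem.Int.bxor (PySem.Int.band (a <<< 1) 0xFF) 0x1B
            else PySem.Int.band (a <<< 1) 0xFF, 0) := by
      simp [pvMulStep, show PySem.Int.band 0 1 = 0 from by decide,
        show (0 : Int) >>> 1 = 0 from by decide]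
    rw [h]; exact ih _

theorem pvRange8 : PySem.List.pyRange 0 8 1 = [0, 1, 2, 3, 4, 5, 6, 7] := by decide

theorem pvZero_bxor (a : Int) : PySem.Int.bxor 0 a = a := by
  rw [PySem.Int.bxor_comm, PySem.Int.bxor_zero]

theorem pvStep_two (a x : Int) : pvMulStep (0, a, 2) x = (0, pvXtime a, 1) := by
  simp [pvMulStep, pvXtime, show PySem.Int.band 2 1 = 0 from by decide,
    show (2 : Int) >>> 1 = 1 from by decide]

theorem pvStep_three (a x : Int) : pvMulStep (0, a, 3) x = (a, pvXtime a, 1) := by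
  simp [pvMulStep, pvXtime, show PySem.Int.band 3 1 = 1 from by decide,
    show (3 : Int) >>> 1 = 1 from by decide, pvZero_bxor]

theorem pvStep_one (p a x : Int) : pvMulStep (p, a, 1) x = (PySem.Int.bxor p a, pvXtime a, 0) := by
  simp [pvMulStep, pvXtime,
    show (1 : Int) >>> 1 = 0 from by decide]

theorem pvMul_two (a : Int) : pvMul a 2 = pvXtime a := by
  rw [pvMul, pvRange8, List.foldl_cons, List.foldl_cons, pvStep_two, pvStep_one,
    pvMulStep_b_zero, pvZero_bxor]

theorem pvMul_three (a : Int) : pvMul a 3 = PySem.Int.bxor a (pvXtime a) := by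
  rw [pvMul, pvRange8, List.foldl_cons, List.foldl_cons, pvStep_three, pvStep_one,
    pvMulStep_b_zero]

-- ===== VERDICT (by name: the statement is the Claim_ definition above) =====
theorem mix_single_column_spec : Claim_equal_mix_single_column := by
  intro col _ _
  unfold Spec_mix_single_column mix_single_column mix_single_column_alt
  simp only [pvMul_two, pvMul_three]
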